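-- pv_equiv track=rewrite | github.com/honu-shell-utions/python | sandbox/project_euler/551-600/555_mccarthy_91_fun01.py | euler_555
-- ===== SOURCE A (Python) =====
-- def euler_555(p, m):
--     ans = 0
--
--     # Iterate over the possible values of d
--     for d in range(1, p // 2 + 1):
--
--         # For this value of d, the possible values of s are exactly the
--         # multiples of d between d and p - d
--         min_s = d
--         max_s = (p - d) - (p % d)
--
--         # Find the count and sum of the possible values of s
--         count_s = (max_s - min_s) // d + 1
--         sum_s = (min_s + max_s) * count_s // 2
--
--         # Add on the contribution to the sum
--         ans += count_s * d * (d + 2 * m + 1) // 2 - d * sum_s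
--
--     return ans
-- ===== SOURCE B (Python) =====
-- def euler_555(p, m):
--     # Divisor-block decomposition: p//d takes O(sqrt(p)) distinct values; each
--     # block [d, hi] with constant q = p//d is summed in closed form via sum-of-d
--     # and sum-of-d^2 formulas.
--     N = p // 2
--     total = 0
--     d = 1
--     while d <= N:
--         q = p // d
--         hi = min(p // q, N)
--         s1 = hi * (hi + 1) // 2 - (d - 1) * d // 2
--         s2 = hi * (hi + 1) * (2 * hi + 1) // 6 - (d - 1) * d * (2 * d - 1) // 6
--         total += (q - 1) * (2 * m + 1) * s1 - (q - 1) * (q - 1) * s2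
--         d = hi + 1
--     return total // 2
-- ===== Notes on version B (the rewrite author's own statement) =====
-- stated objective: faster
-- what changed: Replaces the O(p) per-divisor loop by a divisor-block (hyperbola) decomposition: d-ranges where p//d is constant are summed in closed form with triangular and square-pyramidal sums, so only O(sqrt(p)) blocks are processed.
import Mathlib
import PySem

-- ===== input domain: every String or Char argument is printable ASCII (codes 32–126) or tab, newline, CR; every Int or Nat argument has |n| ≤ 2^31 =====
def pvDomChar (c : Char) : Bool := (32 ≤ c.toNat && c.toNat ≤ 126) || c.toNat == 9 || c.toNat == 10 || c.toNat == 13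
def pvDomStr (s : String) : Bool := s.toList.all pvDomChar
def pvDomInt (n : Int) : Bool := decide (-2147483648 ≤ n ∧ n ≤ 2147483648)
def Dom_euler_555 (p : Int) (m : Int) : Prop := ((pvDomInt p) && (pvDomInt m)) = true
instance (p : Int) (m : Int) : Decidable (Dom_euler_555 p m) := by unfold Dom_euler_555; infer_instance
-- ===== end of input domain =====

-- B replaces A's O(p) per-divisor loop by a divisor-block (hyperbola) decomposition with
-- closed-form block sums — an asymptotically faster (O(sqrt p)) exact re-implementation.

-- ===== PORT A =====
def euler_555 (p : Int) (m : Int) : Int :=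
  (PySem.List.pyRange 1 (PySem.Int.floordiv p 2 + 1) 1).foldl
    (fun ans d =>
      let min_s := d
      let max_s := (p - d) - PySem.Int.mod p d
      let count_s := PySem.Int.floordiv (max_s - min_s) d + 1
      let sum_s := PySem.Int.floordiv ((min_s + max_s) * count_s) 2
      ans + (PySem.Int.floordiv (count_s * d * (d + 2 * m + 1)) 2 - d * sum_s)) 0

-- ===== PORT B =====
-- the 'while d <= N' loop of Source B, ported with fuel (each iteration consumes one unit;
-- N units suffice since d strictly increases)
def euler555Loop (p : Int) (m : Int) (N : Int) : Nat → Int → Int → Int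
  | 0, _, total => total
  | fuel + 1, d, total =>
    if d ≤ N then
      let q := PySem.Int.floordiv p d
      let hi := min (PySem.Int.floordiv p q) N
      let s1 := PySem.Int.floordiv (hi * (hi + 1)) 2 - PySem.Int.floordiv ((d - 1) * d) 2
      let s2 := PySem.Int.floordiv (hi * (hi + 1) * (2 * hi + 1)) 6 -
                PySem.Int.floordiv ((d - 1) * d * (2 * d - 1)) 6
      euler555Loop p m N fuel (hi + 1)
        (total + ((q - 1) * (2 * m + 1) * s1 - (q - 1) * (q - 1) * s2))
    else total

def euler_555_alt (p : Int) (m : Int) : Int :=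
  let N := PySem.Int.floordiv p 2
  PySem.Int.floordiv (euler555Loop p m N N.toNat 1 0) 2

-- ===== PRECONDITION & SPEC =====
def Spec_euler_555 (p : Int) (m : Int) (out : Int) : Prop := out = euler_555_alt p m
instance (p : Int) (m : Int) (out : Int) : Decidable (Spec_euler_555 p m out) := by unfold Spec_euler_555; infer_instance

-- ===== CLAIM (what is proved, stated in full; the proofs are below) =====
def Claim_equal_euler_555 : Prop := ∀ (p : Int) (m : Int), Dom_euler_555 p m → Spec_euler_555 p m (euler_555 p m)

-- ===== LEMMAS AND PROOFS =====

-- A's per-iteration contribution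
def eulerATerm (p : Int) (m : Int) (d : Int) : Int :=
  let min_s := d
  let max_s := (p - d) - PySem.Int.mod p d
  let count_s := PySem.Int.floordiv (max_s - min_s) d + 1
  let sum_s := PySem.Int.floordiv ((min_s + max_s) * count_s) 2
  PySem.Int.floordiv (count_s * d * (d + 2 * m + 1)) 2 - d * sum_s

-- the common per-d closed form (twice A's term)
def eulerG (p : Int) (m : Int) (d : Int) : Int :=
  (PySem.Int.floordiv p d - 1) * (2 * m + 1) * d -
    (PySem.Int.floordiv p d - 1) * (PySem.Int.floordiv p d - 1) * (d * d)

lemma euler_555_eq_sum (p m : Int) :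
    euler_555 p m =
      ((PySem.List.pyRange 1 (PySem.Int.floordiv p 2 + 1) 1).map (eulerATerm p m)).sum := by
  show (PySem.List.pyRange 1 (PySem.Int.floordiv p 2 + 1) 1).foldl
      (fun ans d => ans + eulerATerm p m d) 0 = _
  rw [PySem.List.foldl_add]
  simp

lemma floordiv_mul_cancel (c k : Int) (hc : 0 < c) :
    PySem.Int.floordiv (c * k) c = k := by
  rw [PySem.Int.floordiv_eq_iff_of_pos hc]
  constructor <;> nlinarith

lemma floordiv_const_block (p d e : Int) (hd : 1 ≤ d) (hde : d ≤ e)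
    (he : e ≤ PySem.Int.floordiv p (PySem.Int.floordiv p d)) (hq : 1 ≤ PySem.Int.floordiv p d) :
    PySem.Int.floordiv p e = PySem.Int.floordiv p d := by
  have hd0 : (0:Int) < d := by omega
  have he0 : (0:Int) < e := by omega
  set q := PySem.Int.floordiv p d with hqdef
  obtain ⟨hqd, hub⟩ : q * d ≤ p ∧ p < (q + 1) * d :=
    (PySem.Int.floordiv_eq_iff_of_pos hd0).mp hqdef.symm
  have h1 : e * q ≤ p := (PySem.Int.le_floordiv_iff_mul_le (by omega)).mp he
  have hlow : q ≤ PySem.Int.floordiv p e :=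
    (PySem.Int.le_floordiv_iff_mul_le he0).mpr (by nlinarith)
  have hhigh : PySem.Int.floordiv p e < q + 1 :=
    (PySem.Int.floordiv_lt_iff_lt_mul he0).mpr (by nlinarith)
  omega

lemma sum_range_id (n : Int) (hn : 0 ≤ n) :
    2 * ((PySem.List.pyRange 1 (n + 1) 1).map (fun e => e)).sum = n * (n + 1) := by
  induction n, hn using Int.le_induction with
  | base => rw [PySem.List.pyRange_one_eq_nil (by norm_num)]; simp
  | succ n hn ih =>
    rw [PySem.List.pyRange_one_succ_right (by omega)]
    simp only [List.map_append, List.sum_append, List.map_cons, List.map_nil, List.sum_cons,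
      List.sum_nil]
    linarith

lemma sum_range_sq (n : Int) (hn : 0 ≤ n) :
    6 * ((PySem.List.pyRange 1 (n + 1) 1).map (fun e => e * e)).sum = n * (n + 1) * (2 * n + 1) := by
  induction n, hn using Int.le_induction with
  | base => rw [PySem.List.pyRange_one_eq_nil (by norm_num)]; simp
  | succ n hn ih =>
    rw [PySem.List.pyRange_one_succ_right (by omega)]
    simp only [List.map_append, List.sum_append, List.map_cons, List.map_nil, List.sum_cons,
      List.sum_nil]
    nlinarith [ih]

lemma sum_map_linear (c1 c2 : Int) (l : List Int) :
    (l.map (fun e => c1 * e - c2 * (e * e))).sum =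
      c1 * (l.map (fun e => e)).sum - c2 * (l.map (fun e => e * e)).sum := by
  induction l with
  | nil => simp
  | cons x t ih => simp [ih]; ring

-- block sum: Σ_{e=d}^{hi} e  and  Σ_{e=d}^{hi} e²  as B's closed forms
lemma block_s1 (d hi : Int) (hd : 1 ≤ d) (hdhi : d ≤ hi) :
    PySem.Int.floordiv (hi * (hi + 1)) 2 - PySem.Int.floordiv ((d - 1) * d) 2 =
      ((PySem.List.pyRange d (hi + 1) 1).map (fun e => e)).sum := by
  have h1 : hi * (hi + 1) = 2 * ((PySem.List.pyRange 1 (hi + 1) 1).map (fun e => e)).sum :=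
    (sum_range_id hi (by omega)).symm
  have h2 : (d - 1) * d = 2 * ((PySem.List.pyRange 1 d 1).map (fun e => e)).sum := by
    have := (sum_range_id (d - 1) (by omega)).symm
    rw [show d - 1 + 1 = d by ring] at this
    linarith [this]
  rw [h1, h2, floordiv_mul_cancel, floordiv_mul_cancel,
    PySem.List.pyRange_one_append 1 d (hi + 1) hd (by omega)]
  · simp
  · norm_num
  · norm_num

lemma block_s2 (d hi : Int) (hd : 1 ≤ d) (hdhi : d ≤ hi) :
    PySem.Int.floordiv (hi * (hi + 1) * (2 * hi + 1)) 6 -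
        PySem.Int.floordiv ((d - 1) * d * (2 * d - 1)) 6 =
      ((PySem.List.pyRange d (hi + 1) 1).map (fun e => e * e)).sum := by
  have h1 : hi * (hi + 1) * (2 * hi + 1) =
      6 * ((PySem.List.pyRange 1 (hi + 1) 1).map (fun e => e * e)).sum :=
    (sum_range_sq hi (by omega)).symm
  have h2 : (d - 1) * d * (2 * d - 1) =
      6 * ((PySem.List.pyRange 1 d 1).map (fun e => e * e)).sum := by
    have := (sum_range_sq (d - 1) (by omega)).symm
    rw [show d - 1 + 1 = d by ring] at this
    nlinarith [this]
  rw [h1, h2, floordiv_mul_cancel, floordiv_mul_cancel,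
    PySem.List.pyRange_one_append 1 d (hi + 1) hd (by omega)]
  · simp
  · norm_num
  · norm_num

lemma two_mul_aterm (p m d : Int) (hd : 1 ≤ d) :
    2 * eulerATerm p m d = eulerG p m d := by
  have hd0 : (0:Int) < d := by omega
  have hmod : PySem.Int.floordiv p d * d + PySem.Int.mod p d = p :=
    PySem.Int.floordiv_mul_add_mod p d
  set q := PySem.Int.floordiv p d with hq
  have hmodv : PySem.Int.mod p d = p - q * d := by linarith
  obtain ⟨t, ht⟩ : Even ((q - 1) * q) := by
    have := Int.even_mul_succ_self (q - 1); simpa using this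
  obtain ⟨u, hu⟩ : Even (d * (d + 1)) := Int.even_mul_succ_self d
  unfold eulerATerm
  simp only [hmodv]
  have e1 : p - d - (p - q * d) - d = d * (q - 2) := by ring
  rw [e1, floordiv_mul_cancel d (q - 2) hd0]
  have e2 : (d + (p - d - (p - q * d))) * (q - 2 + 1) = 2 * (d * t) := by
    have h : (q - 1) * q = 2 * t := by omega
    linear_combination d * h
  rw [e2, floordiv_mul_cancel 2 (d * t) (by norm_num)]
  have e3 : (q - 2 + 1) * d * (d + 2 * m + 1) = 2 * ((q - 1) * (u + m * d)) := by
    have h : d * (d + 1) = 2 * u := by omega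
    linear_combination (q - 1) * h
  rw [e3, floordiv_mul_cancel 2 _ (by norm_num)]
  unfold eulerG
  rw [← hq]
  have ht2 : (q - 1) * q = 2 * t := by omega
  have hu2 : d * (d + 1) = 2 * u := by omega
  linear_combination d * d * ht2 - (q - 1) * hu2

lemma loop_succ (p m N : Int) (fuel : Nat) (d total : Int) :
    euler555Loop p m N (fuel + 1) d total = if d ≤ N then
      euler555Loop p m N fuel
        ((min (PySem.Int.floordiv p (PySem.Int.floordiv p d)) N) + 1)
        (total + ((PySem.Int.floordiv p d - 1) * (2 * m + 1) *
            (PySem.Int.floordiv ((min (PySem.Int.floordiv p (PySem.Int.floordiv p d)) N) *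
                ((min (PySem.Int.floordiv p (PySem.Int.floordiv p d)) N) + 1)) 2 -
              PySem.Int.floordiv ((d - 1) * d) 2) -
          (PySem.Int.floordiv p d - 1) * (PySem.Int.floordiv p d - 1) *
            (PySem.Int.floordiv ((min (PySem.Int.floordiv p (PySem.Int.floordiv p d)) N) *
                ((min (PySem.Int.floordiv p (PySem.Int.floordiv p d)) N) + 1) *
                (2 * (min (PySem.Int.floordiv p (PySem.Int.floordiv p d)) N) + 1)) 6 -
              PySem.Int.floordiv ((d - 1) * d * (2 * d - 1)) 6)))
    else total := rfl

lemma loop_eq_sum (p m : Int) (fuel : Nat) (d total : Int) (hd : 1 ≤ d)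
    (hfuel : (PySem.Int.floordiv p 2 + 1 - d).toNat ≤ fuel) :
    euler555Loop p m (PySem.Int.floordiv p 2) fuel d total =
      total + ((PySem.List.pyRange d (PySem.Int.floordiv p 2 + 1) 1).map (eulerG p m)).sum := by
  induction fuel generalizing d total with
  | zero =>
    rw [PySem.List.pyRange_one_eq_nil (by omega)]
    simp [euler555Loop]
  | succ fuel ih =>
    set N := PySem.Int.floordiv p 2 with hN
    by_cases hdN : d ≤ N
    · have hd0 : (0:Int) < d := by omega
      have hp2 : d * 2 ≤ p := (PySem.Int.le_floordiv_iff_mul_le (by norm_num)).mp hdN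
      set q := PySem.Int.floordiv p d with hq
      have hq2 : 2 ≤ q := (PySem.Int.le_floordiv_iff_mul_le hd0).mpr (by nlinarith)
      have hqd : q * d ≤ p := (PySem.Int.le_floordiv_iff_mul_le hd0).mp (le_refl q)
      have hdpq : d ≤ PySem.Int.floordiv p q :=
        (PySem.Int.le_floordiv_iff_mul_le (by omega)).mpr (by nlinarith)
      set hi := min (PySem.Int.floordiv p q) N with hhi
      have hdhi : d ≤ hi := le_min hdpq hdN
      have hhiN : hi ≤ N := min_le_right _ _
      have hblock : (q - 1) * (2 * m + 1) *
            (PySem.Int.floordiv (hi * (hi + 1)) 2 - PySem.Int.floordiv ((d - 1) * d) 2) -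
          (q - 1) * (q - 1) *
            (PySem.Int.floordiv (hi * (hi + 1) * (2 * hi + 1)) 6 -
              PySem.Int.floordiv ((d - 1) * d * (2 * d - 1)) 6) =
          ((PySem.List.pyRange d (hi + 1) 1).map (eulerG p m)).sum := by
        rw [block_s1 d hi hd hdhi, block_s2 d hi hd hdhi,
          ← sum_map_linear ((q - 1) * (2 * m + 1)) ((q - 1) * (q - 1))]
        apply congrArg
        apply List.map_congr_left
        intro e hmem
        rw [PySem.List.mem_pyRange_one] at hmem
        have hehi : e ≤ hi := by omega
        have hepq : e ≤ PySem.Int.floordiv p q := le_trans hehi (min_le_left _ _)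
        have hpe : PySem.Int.floordiv p e = q :=
          floordiv_const_block p d e hd hmem.1 (by rw [← hq]; exact hepq) (by omega)
        simp only [eulerG, hpe]
      have hstep : euler555Loop p m N (fuel + 1) d total =
          euler555Loop p m N fuel (hi + 1)
            (total + ((PySem.List.pyRange d (hi + 1) 1).map (eulerG p m)).sum) := by
        rw [loop_succ, if_pos hdN, ← hq, ← hhi, hblock]
      rw [hstep, ih (hi + 1) _ (by omega) (by omega),
        PySem.List.pyRange_one_append d (hi + 1) (N + 1) (by omega) (by omega)]
      simp [add_assoc]
    · rw [loop_succ, if_neg hdN, PySem.List.pyRange_one_eq_nil (by omega)]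
      simp

-- ===== VERDICT (by name: the statement is the Claim_ definition above) =====
theorem euler_555_spec : Claim_equal_euler_555 := by
  intro p m _
  show euler_555 p m =
    PySem.Int.floordiv
      (euler555Loop p m (PySem.Int.floordiv p 2) (PySem.Int.floordiv p 2).toNat 1 0) 2
  rw [loop_eq_sum p m (PySem.Int.floordiv p 2).toNat 1 0 (le_refl 1) (by omega), zero_add]
  have hsum : ((PySem.List.pyRange 1 (PySem.Int.floordiv p 2 + 1) 1).map (eulerG p m)).sum =
      2 * ((PySem.List.pyRange 1 (PySem.Int.floordiv p 2 + 1) 1).map (eulerATerm p m)).sum := by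
    rw [List.map_congr_left (g := fun e => 2 * eulerATerm p m e) ?_]
    · exact List.sum_map_mul_left _ _ _
    · intro e hmem
      rw [PySem.List.mem_pyRange_one] at hmem
      exact (two_mul_aterm p m e hmem.1).symm
  rw [hsum, floordiv_mul_cancel 2 _ (by norm_num), euler_555_eq_sum]
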